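-- pv_equiv track=rewrite | github.com/DataDog/datadog-agent | pkg/network/usm/testdata/haproxy_tls_leak/analyze.py | decode_tags
-- ===== SOURCE A (Python) =====
-- TAG_NAMES = {
--     0x01: "GnuTLS",
--     0x02: "OpenSSL",
--     0x04: "Go",
--     0x08: "ConnTLS",
--     0x10: "Istio",
--     0x20: "NodeJS",
-- }
--
-- def decode_tags(tags_val):
--     """Decode StaticTags bitmask to human-readable names."""
--     if not tags_val:
--         return "none"
--     names = []
--     for bit, name in TAG_NAMES.items():
--         if tags_val & bit:
--             names.append(name)
--     return ",".join(names) if names else "unknown({})".format(tags_val)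
-- ===== SOURCE B (Python) =====
-- TAG_NAMES = {
--     0x01: "GnuTLS",
--     0x02: "OpenSSL",
--     0x04: "Go",
--     0x08: "ConnTLS",
--     0x10: "Istio",
--     0x20: "NodeJS",
-- }
--
--
-- def _build_table():
--     # Dynamic-programming doubling: after processing a name, the table holds the
--     # decoded string for every mask over the names seen so far.
--     table = [""]
--     for name in TAG_NAMES.values():
--         table += [name if not t else t + "," + name for t in table]
--     return table
--
--
-- _DECODED = _build_table()
--
--
-- def decode_tags(tags_val):
--     """Decode StaticTags bitmask to human-readable names."""
--     if not tags_val: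
--         return "none"
--     m = tags_val & 0x3F
--     return _DECODED[m] if m else "unknown({})".format(tags_val)
-- ===== Notes on version B (the rewrite author's own statement) =====
-- stated objective: alternative
-- what changed: B precomputes, by dynamic-programming doubling over the six names, a full table mapping every possible masked bit pattern to its decoded string, so each call is a single O(1) table lookup on the masked value instead of A's per-call scan over TAG_NAMES with append-and-join.
import Mathlib
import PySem

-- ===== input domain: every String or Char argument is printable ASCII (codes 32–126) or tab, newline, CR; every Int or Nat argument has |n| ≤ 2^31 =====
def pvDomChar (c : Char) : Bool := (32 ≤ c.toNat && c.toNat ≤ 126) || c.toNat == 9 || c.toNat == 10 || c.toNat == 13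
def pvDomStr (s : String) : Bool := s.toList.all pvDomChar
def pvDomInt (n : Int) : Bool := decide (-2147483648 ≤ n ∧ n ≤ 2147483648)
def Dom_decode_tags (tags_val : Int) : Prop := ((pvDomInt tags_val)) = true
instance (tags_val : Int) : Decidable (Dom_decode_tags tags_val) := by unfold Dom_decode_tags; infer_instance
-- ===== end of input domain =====

-- B precomputes a full decode table (DP doubling over the six names) and answers each
-- call by one lookup on the masked value, instead of A's per-call scan of TAG_NAMES; objective: alternative.

-- ===== PORT A =====
-- TAG_NAMES as an association list in insertion (ascending-key) order.
def pvTagTable : List (Int × String) :=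
  [(1, "GnuTLS"), (2, "OpenSSL"), (4, "Go"), (8, "ConnTLS"), (16, "Istio"), (32, "NodeJS")]

def decode_tags (tags_val : Int) : String :=
  if tags_val = 0 then "none"
  else
    let names := pvTagTable.foldl
      (fun acc p => if PySem.Int.band tags_val p.1 ≠ 0 then acc ++ [p.2] else acc) []
    if names = [] then "unknown(" ++ PySem.Int.toStr tags_val ++ ")"
    else PySem.Str.join "," names

-- ===== PORT B =====
-- _build_table(): start from [""] and double once per name (list += comprehension over itself)
def pvBuildStep (tbl : List String) (name : String) : List String :=
  tbl ++ tbl.map (fun t => if t = "" then name else t ++ "," ++ name)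

def pvDecodedTable : List String :=
  ["GnuTLS", "OpenSSL", "Go", "ConnTLS", "Istio", "NodeJS"].foldl pvBuildStep [""]

def decode_tags_alt (tags_val : Int) : String :=
  if tags_val = 0 then "none"
  else
    let m := (PySem.Int.band tags_val 63).toNat
    if m = 0 then "unknown(" ++ PySem.Int.toStr tags_val ++ ")"
    else
      -- _DECODED[m]; 0 < m < 64 = len(_DECODED), so the IndexError branch (none) is unreachable
      match PySem.List.pyGet? pvDecodedTable (m : Int) with
      | some s => s
      | none => ""

-- ===== PRECONDITION & SPEC =====
def Spec_decode_tags (tags_val : Int) (out : String) : Prop := out = decode_tags_alt tags_val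
instance (tags_val : Int) (out : String) : Decidable (Spec_decode_tags tags_val out) := by unfold Spec_decode_tags; infer_instance

-- ===== CLAIM (what is proved, stated in full; the proofs are below) =====
def Claim_equal_decode_tags : Prop := ∀ (tags_val : Int), Dom_decode_tags tags_val → Spec_decode_tags tags_val (decode_tags tags_val)

-- ===== LEMMAS AND PROOFS =====

-- the six names A collects, as a function of the masked value n = (tags_val & 63)
def pvNamesOf (n : Nat) : List String :=
  (if n &&& 1 ≠ 0 then ["GnuTLS"] else []) ++
  (if n &&& 2 ≠ 0 then ["OpenSSL"] else []) ++
  (if n &&& 4 ≠ 0 then ["Go"] else []) ++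
  (if n &&& 8 ≠ 0 then ["ConnTLS"] else []) ++
  (if n &&& 16 ≠ 0 then ["Istio"] else []) ++
  (if n &&& 32 ≠ 0 then ["NodeJS"] else [])

theorem pv_and63_mod (u : Nat) : 63 &&& u = u % 64 := by
  rw [Nat.land_comm]
  simpa using Nat.and_two_pow_sub_one_eq_mod u 6

theorem pv_sub_and_table : ∀ r < 64, ∀ b ∈ [1, 2, 4, 8, 16, 32], b - (b &&& r) = (63 - r) &&& b := by
  decide

-- the six bit tests of A depend only on the masked value
theorem pv_bit_eq (t : Int) (b : Nat) (hb : b ∈ ([1, 2, 4, 8, 16, 32] : List Nat)) :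
    PySem.Int.band t (b : Int) = ((PySem.Int.band t 63).toNat &&& b : Nat) := by
  have hblt : b < 64 := by fin_cases hb <;> norm_num
  have hb0 : (0 : Int) ≤ (b : Int) := by positivity
  have h630 : (0 : Int) ≤ (63 : Int) := by norm_num
  have h63t : ((63 : Int)).toNat = 63 := rfl
  unfold PySem.Int.band
  by_cases ht : 0 ≤ t
  · simp only [if_pos ht, if_pos hb0, if_pos h630, Int.toNat_natCast, h63t]
    congr 1
    rw [Nat.land_assoc]
    congr 1
    rw [pv_and63_mod, Nat.mod_eq_of_lt hblt]
  · simp only [if_neg ht, if_pos hb0, if_pos h630, Int.toNat_natCast, h63t]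
    congr 1
    have h63 : 63 &&& (-t - 1).toNat = (-t - 1).toNat % 64 := pv_and63_mod _
    have hb63 : b &&& (-t - 1).toNat = b &&& ((-t - 1).toNat % 64) := by
      conv_lhs => rw [show b = b &&& 63 from by
        rw [Nat.land_comm, pv_and63_mod b, Nat.mod_eq_of_lt hblt]]
      rw [Nat.land_assoc, h63]
    rw [h63, hb63]
    exact pv_sub_and_table _ (Nat.mod_lt _ (by norm_num)) b hb

theorem pv_mask_lt (t : Int) : (PySem.Int.band t 63).toNat < 64 := by
  have h630 : (0 : Int) ≤ (63 : Int) := by norm_num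
  have h63t : ((63 : Int)).toNat = 63 := rfl
  unfold PySem.Int.band
  by_cases ht : 0 ≤ t
  · simp only [if_pos ht, if_pos h630, Int.toNat_natCast, h63t]
    rw [Nat.land_comm, pv_and63_mod]
    exact Nat.mod_lt _ (by norm_num)
  · simp only [if_neg ht, if_pos h630, Int.toNat_natCast, h63t]
    omega

theorem pv_foldl_eq_namesOf (t : Int) :
    pvTagTable.foldl
      (fun acc p => if PySem.Int.band t p.1 ≠ 0 then acc ++ [p.2] else acc) [] =
    pvNamesOf (PySem.Int.band t 63).toNat := by
  have h1 := pv_bit_eq t 1 (by norm_num)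
  have h2 := pv_bit_eq t 2 (by norm_num)
  have h4 := pv_bit_eq t 4 (by norm_num)
  have h8 := pv_bit_eq t 8 (by norm_num)
  have h16 := pv_bit_eq t 16 (by norm_num)
  have h32 := pv_bit_eq t 32 (by norm_num)
  simp only [Nat.cast_one, Nat.cast_ofNat] at h1 h2 h4 h8 h16 h32
  simp only [pvTagTable, pvNamesOf, List.foldl, h1, h2, h4, h8, h16, h32, ne_eq,
    Int.natCast_eq_zero]
  split_ifs <;> simp

theorem pv_namesOf_zero_iff : ∀ n < 64, (pvNamesOf n = [] ↔ n = 0) := by decide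

theorem pv_join_eq_table : ∀ n < 64, n ≠ 0 →
    PySem.Str.join "," (pvNamesOf n) =
      (match PySem.List.pyGet? pvDecodedTable (n : Int) with
       | some s => s
       | none => "") := by decide

-- ===== VERDICT (by name: the statement is the Claim_ definition above) =====
theorem decode_tags_spec : Claim_equal_decode_tags := by
  intro t _
  unfold Spec_decode_tags decode_tags decode_tags_alt
  by_cases h0 : t = 0
  · simp [h0]
  · simp only [h0, if_false]
    rw [pv_foldl_eq_namesOf t]
    have hlt := pv_mask_lt t
    by_cases hm : (PySem.Int.band t 63).toNat = 0
    · simp [hm, pvNamesOf]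
    · have hne : pvNamesOf (PySem.Int.band t 63).toNat ≠ [] := by
        intro h; exact hm ((pv_namesOf_zero_iff _ hlt).1 h)
      simp only [hm, if_false, hne]
      exact pv_join_eq_table _ hlt hm
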